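-- pv_equiv track=rewrite | github.com/LukhaGian/ScientificComputing | dna_strings/project2.py | x_mutation_counter
-- ===== SOURCE A (Python) =====
-- def x_mutation_counter(S, sub, x, L2):
--     """
--     Function that appends the number of x_mutations' positions of the substring sub in the string S
--     """
--     # We create a list of all the possible nucleotides
--     no_mutations = 0
--     nuc = ['A', 'C', 'G', 'T']
--     nuc.remove(sub[x]) # We remove from the list the nucleotide in sub at position x
--     for j in nuc:
--         # since we cannot modify directly the string, we actually create a list and then convert it back to string
--         mutant_sub_list = list(sub)
--         mutant_sub_list[x] = j
--         mutant_sub = ''.join(mutant_sub_list) # now we have our mutant substring (type string)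
--         # We check, using the Rabin Karp algorithm, the occurencies of the mutant string in S
--         mutant_occ = rabin_karp_search(S, mutant_sub)
--         no_mutations += len(mutant_occ) # update the number of occurencies
--
--     L2.append(no_mutations) #append the total value to L2
--
--     return L2
--
-- base = 4
--
-- mod = 100049
--
-- def extend_by_one(h, c):
--     return (base * h + ord(c)) % mod
--
-- def remove_left(h, c, bstar):
--     return (h - bstar * ord(c)) % mod
--
-- def hash_value(s):
--     h = 0
--     for c in s: h = extend_by_one(h, c)
--     return h
--
-- def rabin_karp_search(s, p):
--     """ return all the occurances of p in s using the Rabin-Karp algorithm """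
--     indeces = []
--     n, m = len(s), len(p)
--     bstar = pow(base, m-1, mod)
--     hp = hash_value(p)
--     hs = hash_value(s[:m])
--     for i in range(n-m+1):
--         if hp == hs:
--             if s[i:i+m] == p: indeces.append(i)
--         if i < n-m:
--             hs = remove_left(hs, s[i], bstar)
--             hs = extend_by_one(hs, s[i+m])
--     return indeces
-- ===== SOURCE B (Python) =====
-- def x_mutation_counter(S, sub, x, L2):
--     """
--     Appends to L2 the number of occurrences in S of the single-position-x
--     mutants of sub (position x replaced by one of the other three bases),
--     counted by one direct window scan instead of three Rabin-Karp searches.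
--     Mutates L2 in place, like the original.
--     """
--     m = len(sub)
--     orig = sub[x]                       # same IndexError on a bad x
--     xi = x + m if x < 0 else x          # normalize the index once
--     alts = [c for c in 'ACGT' if c != orig]
--     count = 0
--     for i in range(len(S) - m + 1):
--         if (S[i + xi] in alts
--                 and S[i:i + xi] == sub[:xi]
--                 and S[i + xi + 1:i + m] == sub[xi + 1:]):
--             count += 1
--     L2.append(count)
--     return L2
-- ===== Notes on version B (the rewrite author's own statement) =====
-- stated objective: simpler
-- what changed: Instead of building the three mutant substrings and running a rolling-hash Rabin-Karp search for each, B makes one direct scan over the windows of S, counting windows that equal sub everywhere except position x where they carry one of the three alternative bases; same in-place append to L2.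
import Mathlib
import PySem

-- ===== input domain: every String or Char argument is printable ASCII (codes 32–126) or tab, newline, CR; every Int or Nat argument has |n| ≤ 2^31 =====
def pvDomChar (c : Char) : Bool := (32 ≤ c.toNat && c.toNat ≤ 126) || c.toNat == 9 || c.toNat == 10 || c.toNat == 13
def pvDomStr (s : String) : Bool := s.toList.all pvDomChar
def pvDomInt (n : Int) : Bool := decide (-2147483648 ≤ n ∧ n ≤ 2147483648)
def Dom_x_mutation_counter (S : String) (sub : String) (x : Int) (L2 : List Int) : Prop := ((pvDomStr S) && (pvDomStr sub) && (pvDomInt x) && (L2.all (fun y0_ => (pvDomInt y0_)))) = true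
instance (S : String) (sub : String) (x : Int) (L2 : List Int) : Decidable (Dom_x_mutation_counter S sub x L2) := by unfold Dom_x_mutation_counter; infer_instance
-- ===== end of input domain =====

-- B replaces A's three per-mutant Rabin-Karp searches by one direct window scan (objective: simpler).
-- Both A and B append to L2 in place in Python; the equivalence proved here is about the return value.

-- ===== PORT A =====
-- extend_by_one / remove_left / hash_value / rabin_karp_search, transliterated over List Char
def pvExtendByOne (h : Int) (c : Char) : Int := PySem.Int.mod (4 * h + (c.toNat : Int)) 100049

def pvRemoveLeft (h : Int) (c : Char) (bstar : Int) : Int := PySem.Int.mod (h - bstar * (c.toNat : Int)) 100049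

def pvHashValue (s : List Char) : Int := s.foldl pvExtendByOne 0

def pvRabinKarp (s p : List Char) : List Int :=
  let n := s.length
  let m := p.length
  -- pow(base, m-1, mod): exact for m ≥ 1 (m = 0 is unreachable under Pre_: sub[x] raises first,
  -- and A's callers always pass a p of the same length as sub)
  let bstar := PySem.Int.powMod 4 (m - 1) 100049
  let hp := pvHashValue p
  let hs0 := pvHashValue (PySem.List.slice s none (some (m : Int)))
  let st := (PySem.List.pyRange 0 ((n : Int) - (m : Int) + 1) 1).foldl
    (fun (st : List Int × Int) (i : Int) =>
      let idx := if hp = st.2 ∧ PySem.List.slice s (some i) (some (i + (m : Int))) = p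
                 then st.1 ++ [i] else st.1
      let hs := if i < (n : Int) - (m : Int) then
          -- s[i] and s[i+m] are in range on every iteration the guard admits
          pvExtendByOne (pvRemoveLeft st.2 (PySem.List.pyGetD s i 'A') bstar)
                        (PySem.List.pyGetD s (i + (m : Int)) 'A')
        else st.2
      (idx, hs)) ([], hs0)
  st.1

def x_mutation_counter (S : String) (sub : String) (x : Int) (L2 : List Int) : List Int :=
  match PySem.Str.pyGet? sub x with
  | none => L2  -- sub[x]: IndexError, outside Pre_
  | some c =>
    match PySem.List.remove? ['A', 'C', 'G', 'T'] c with
    | none => L2  -- nuc.remove(sub[x]): ValueError, outside Pre_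
    | some nuc =>
      let noMutations : Int := nuc.foldl (fun acc j =>
        -- mutant_sub_list[x] = j: x is a valid index here since sub[x] succeeded
        let mutantSub := PySem.List.pySetD sub.toList x j
        acc + ((pvRabinKarp S.toList mutantSub).length : Int)) 0
      L2 ++ [noMutations]

-- ===== PORT B =====
def x_mutation_counter_alt (S : String) (sub : String) (x : Int) (L2 : List Int) : List Int :=
  let s := S.toList
  let t := sub.toList
  let m := t.length
  match PySem.List.pyGet? t x with
  | none => L2  -- sub[x]: same IndexError as A, outside Pre_
  | some orig =>
    let xi : Int := if x < 0 then x + (m : Int) else x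
    let alts := ['A', 'C', 'G', 'T'].filter (fun c => c ≠ orig)
    let count : Int := (PySem.List.pyRange 0 ((s.length : Int) - (m : Int) + 1) 1).foldl
      (fun (acc : Int) (i : Int) =>
        if PySem.List.pyGetD s (i + xi) 'A' ∈ alts
            ∧ PySem.List.slice s (some i) (some (i + xi)) = PySem.List.slice t none (some xi)
            ∧ PySem.List.slice s (some (i + xi + 1)) (some (i + (m : Int))) = PySem.List.slice t (some (xi + 1)) none
        then acc + 1 else acc) 0
    L2 ++ [count]

-- ===== PRECONDITION & SPEC =====
-- Pre_ excludes exactly the inputs on which A raises: x not a valid (possibly negative) index of sub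
-- (IndexError at sub[x]) or sub[x] not one of 'A','C','G','T' (ValueError at nuc.remove(sub[x])).
def Pre_x_mutation_counter (S : String) (sub : String) (x : Int) (L2 : List Int) : Prop :=
  PySem.Raise.InRange sub.toList.length x ∧
  PySem.List.pyGetD sub.toList x 'X' ∈ ['A', 'C', 'G', 'T']
instance (S : String) (sub : String) (x : Int) (L2 : List Int) : Decidable (Pre_x_mutation_counter S sub x L2) := by unfold Pre_x_mutation_counter; infer_instance

def pvWitness_x_mutation_counter : String × String × Int × List Int := ("ACGTAGGT", "AG", 0, [3])

def Spec_x_mutation_counter (S : String) (sub : String) (x : Int) (L2 : List Int) (out : List Int) : Prop := out = x_mutation_counter_alt S sub x L2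
instance (S : String) (sub : String) (x : Int) (L2 : List Int) (out : List Int) : Decidable (Spec_x_mutation_counter S sub x L2 out) := by unfold Spec_x_mutation_counter; infer_instance

-- ===== CLAIM (what is proved, stated in full; the proofs are below) =====
def Claim_equal_x_mutation_counter : Prop := ∀ (S : String) (sub : String) (x : Int) (L2 : List Int), Dom_x_mutation_counter S sub x L2 → Pre_x_mutation_counter S sub x L2 → Spec_x_mutation_counter S sub x L2 (x_mutation_counter S sub x L2)

-- ===== LEMMAS AND PROOFS =====

def pvPoly (l : List Char) : Int := l.foldl (fun a c => 4 * a + (c.toNat : Int)) 0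
lemma pvPoly_aux (l : List Char) : ∀ a : Int,
    l.foldl (fun a c => 4 * a + (c.toNat : Int)) a = a * 4 ^ l.length + pvPoly l := by
  induction l with
  | nil => intro a; simp [pvPoly]
  | cons c l ih =>
    intro a
    simp only [List.foldl_cons, List.length_cons, pvPoly]
    rw [ih (4 * a + c.toNat), ih (4 * 0 + c.toNat)]
    ring
lemma pvPoly_cons (c : Char) (l : List Char) :
    pvPoly (c :: l) = (c.toNat : Int) * 4 ^ l.length + pvPoly l := by
  show List.foldl _ _ (c :: l) = _
  rw [List.foldl_cons, pvPoly_aux]; ring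
lemma pvPoly_append_singleton (l : List Char) (c : Char) :
    pvPoly (l ++ [c]) = 4 * pvPoly l + (c.toNat : Int) := by
  show List.foldl _ _ (l ++ [c]) = _
  rw [List.foldl_append]; rfl
lemma pvHash_eq_poly_mod (l : List Char) : ∀ (a b : Int), a = b % 100049 →
    l.foldl pvExtendByOne a = (l.foldl (fun a c => 4 * a + (c.toNat : Int)) b) % 100049 := by
  induction l with
  | nil => intro a b h; simpa using h
  | cons c l ih =>
    intro a b h
    simp only [List.foldl_cons]
    apply ih
    rw [pvExtendByOne, PySem.Int.mod_eq_emod_of_pos (by norm_num), h]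
    conv_lhs => rw [Int.add_emod, Int.mul_emod, Int.emod_emod_of_dvd _ dvd_rfl]
    conv_rhs => rw [Int.add_emod, Int.mul_emod]

lemma pvHashValue_eq (l : List Char) : pvHashValue l = pvPoly l % 100049 :=
  pvHash_eq_poly_mod l 0 0 (by norm_num)

lemma pvRoll (c d : Char) (rest : List Char) :
    pvExtendByOne (pvRemoveLeft (pvPoly (c :: rest) % 100049) c ((4 ^ rest.length) % 100049)) d
      = pvPoly (rest ++ [d]) % 100049 := by
  have h1 : pvRemoveLeft (pvPoly (c :: rest) % 100049) c ((4 ^ rest.length) % 100049)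
      = pvPoly rest % 100049 := by
    rw [pvRemoveLeft, PySem.Int.mod_eq_emod_of_pos (by norm_num), pvPoly_cons]
    conv_lhs => rw [Int.sub_emod, Int.emod_emod_of_dvd _ dvd_rfl, Int.mul_emod, Int.emod_emod_of_dvd _ dvd_rfl, ← Int.mul_emod, ← Int.sub_emod]
    ring_nf
  rw [h1, pvExtendByOne, PySem.Int.mod_eq_emod_of_pos (by norm_num), pvPoly_append_singleton]
  conv_lhs => rw [Int.add_emod, Int.mul_emod, Int.emod_emod_of_dvd _ dvd_rfl, ← Int.mul_emod, ← Int.add_emod]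

-- window abbreviation (proof-only)
def pvW (s : List Char) (m k : Nat) : List Char := (s.drop k).take m

lemma pvW_decomp (s : List Char) (m k : Nat) (hm : 1 ≤ m) (h : k + m ≤ s.length) :
    pvW s m k = s[k]'(by omega) :: (s.drop (k + 1)).take (m - 1) := by
  obtain ⟨m', rfl⟩ : ∃ m', m = m' + 1 := ⟨m - 1, by omega⟩
  rw [pvW, List.drop_eq_getElem_cons (by omega : k < s.length), List.take_succ_cons]
  simp
lemma pvW_succ (s : List Char) (m k : Nat) (hm : 1 ≤ m) (h : k + 1 + m ≤ s.length) :
    pvW s m (k + 1) = (s.drop (k + 1)).take (m - 1) ++ [s[k + m]'(by omega)] := by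
  rw [pvW]
  obtain ⟨m', rfl⟩ : ∃ m', m = m' + 1 := ⟨m - 1, by omega⟩
  rw [List.take_add_one]
  simp [List.getElem?_drop, List.getElem?_eq_getElem (by omega : k + 1 + m' < s.length)]
  congr 1
  omega

lemma pvCountP_add_disjoint {α : Type} (l : List α) (p q : α → Bool)
    (h : ∀ x ∈ l, ¬(p x = true ∧ q x = true)) :
    l.countP p + l.countP q = l.countP (fun x => p x || q x) := by
  induction l with
  | nil => simp
  | cons a l ih =>
    simp only [List.countP_cons]
    have := h a (by simp)
    have hr := ih (fun x hx => h x (by simp [hx]))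
    by_cases hp : p a <;> by_cases hq : q a <;> simp_all <;> omega

lemma pvSet_char (l t : List Char) (ξ : Nat) (j : Char)
    (hξ : ξ < t.length) :
    l = t.set ξ j ↔ (l.take ξ = t.take ξ ∧ l[ξ]? = some j ∧ l.drop (ξ + 1) = t.drop (ξ + 1)) := by
  constructor
  · rintro rfl
    refine ⟨by rw [List.take_set, List.set_eq_of_length_le (by simp)],
      List.getElem?_set_self (by simpa using hξ), by simp [List.drop_set]⟩
  · rintro ⟨h1, h2, h3⟩
    apply List.ext_getElem?
    intro n
    rcases lt_trichotomy n ξ with hn | rfl | hn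
    · have h4 := congrArg (fun u => u[n]?) h1
      simp only [List.getElem?_take_of_lt hn] at h4
      rw [h4, List.getElem?_set_ne (show ξ ≠ n by omega)]
    · rw [h2, List.getElem?_set_self (by omega)]
    · have h4 := congrArg (fun u => u[n - (ξ + 1)]?) h3
      simp only [List.getElem?_drop] at h4
      rw [show ξ + 1 + (n - (ξ + 1)) = n from by omega] at h4
      rw [h4, List.getElem?_set_ne (show ξ ≠ n by omega)]

lemma pvRK_loop (s p : List Char) (hm : 1 ≤ p.length) :
    ∀ (c k : Nat) (idx : List Int) (hs : Int),
      k + c = ((s.length : Int) - (p.length : Int) + 1).toNat →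
      (c ≠ 0 → hs = pvPoly (pvW s p.length k) % 100049) →
      ((PySem.List.pyRange (k : Int) ((s.length : Int) - (p.length : Int) + 1) 1).foldl
        (fun (st : List Int × Int) (i : Int) =>
          let idx := if pvHashValue p = st.2 ∧ PySem.List.slice s (some i) (some (i + (p.length : Int))) = p
                     then st.1 ++ [i] else st.1
          let hs := if i < (s.length : Int) - (p.length : Int) then
              pvExtendByOne (pvRemoveLeft st.2 (PySem.List.pyGetD s i 'A') (PySem.Int.powMod 4 (p.length - 1) 100049))
                            (PySem.List.pyGetD s (i + (p.length : Int)) 'A')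
            else st.2
          (idx, hs)) (idx, hs)).1.length
      = idx.length + (List.range' k c).countP (fun t => decide (pvW s p.length t = p)) := by
  set n := s.length with hn
  set m := p.length with hmdef
  intro c
  induction c with
  | zero =>
    intro k idx hs hkc _
    rw [PySem.List.pyRange_one_eq_nil (by omega)]
    simp
  | succ c ih =>
    intro k idx hs hkc hinv
    have hkN : (k : Int) < (n : Int) - m + 1 := by omega
    have hkm : k + m ≤ n := by omega
    rw [PySem.List.pyRange_one_cons hkN, List.foldl_cons]
    have hsv := hinv (by omega)
    have hslice : PySem.List.slice s (some (k : Int)) (some ((k : Int) + (m : Int))) = pvW s m k := by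
      rw [PySem.List.slice_natCast_add]; rfl
    have hcond : (pvHashValue p = hs ∧
        PySem.List.slice s (some (k : Int)) (some ((k : Int) + (m : Int))) = p) ↔ pvW s m k = p := by
      constructor
      · exact fun h => by rw [← hslice]; exact h.2
      · intro h
        refine ⟨?_, by rw [hslice, h]⟩
        rw [pvHashValue_eq, hsv, h]
    -- the new index list
    have hidx : (if pvHashValue p = hs ∧
          PySem.List.slice s (some (k : Int)) (some ((k : Int) + (m : Int))) = p
        then idx ++ [(k : Int)] else idx)
        = (if pvW s m k = p then idx ++ [(k : Int)] else idx) := by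
      exact if_congr hcond rfl rfl
    by_cases hc : c = 0
    · -- last iteration: the guard i < n - m is false
      subst hc
      have hg : ¬ ((k : Int) < (n : Int) - m) := by omega
      simp only [hidx, if_neg hg]
      rw [PySem.List.pyRange_one_eq_nil (by omega)]
      simp only [List.foldl_nil]
      by_cases hw : pvW s m k = p <;>
        simp [hw, List.range'_succ]
    · -- the guard holds; roll the hash to the next window
      have hg : (k : Int) < (n : Int) - m := by omega
      have hk1m : k + 1 + m ≤ n := by omega
      have hget1 : PySem.List.pyGetD s (k : Int) 'A' = s[k]'(by omega) := by
        rw [PySem.List.pyGetD_eq_getElem s 'A' (by omega) (by omega)]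
        simp
      have hget2 : PySem.List.pyGetD s ((k : Int) + (m : Int)) 'A' = s[k + m]'(by omega) := by
        rw [PySem.List.pyGetD_eq_getElem s 'A' (by omega) (by omega)]
        have hix : ((k : Int) + (m : Int)).toNat = k + m := by omega
        simp [hix]
      have hbstar : PySem.Int.powMod 4 (m - 1) 100049 = (4 ^ ((s.drop (k+1)).take (m-1)).length) % 100049 := by
        rw [PySem.Int.powMod, PySem.Int.mod_eq_emod_of_pos (by norm_num)]
        congr 2
        simp only [List.length_take, List.length_drop]
        omega
      have hroll : pvExtendByOne (pvRemoveLeft hs (PySem.List.pyGetD s (k : Int) 'A')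
            (PySem.Int.powMod 4 (m - 1) 100049)) (PySem.List.pyGetD s ((k : Int) + (m : Int)) 'A')
          = pvPoly (pvW s m (k + 1)) % 100049 := by
        rw [hget1, hget2, hbstar, hsv, pvW_decomp s m k hm hkm, pvRoll, ← pvW_succ s m k hm hk1m]
      simp only [hidx, if_pos hg, hroll]
      have : ((k : Int) + 1) = ((k + 1 : Nat) : Int) := by push_cast; ring
      rw [this, ih (k + 1) _ _ (by omega) (fun _ => rfl)]
      by_cases hw : pvW s m k = p <;>
        simp [hw, List.range'_succ] <;> omega

lemma pvRabinKarp_length (s p : List Char) (hm : 1 ≤ p.length) :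
    (pvRabinKarp s p).length
      = (List.range (((s.length : Int) - (p.length : Int) + 1).toNat)).countP
          (fun k => decide (pvW s p.length k = p)) := by
  have h0 := pvRK_loop s p hm (((s.length : Int) - (p.length : Int) + 1).toNat) 0 [] 
      (pvHashValue (PySem.List.slice s none (some (p.length : Int)))) (by omega)
      (fun _ => by
        rw [PySem.List.slice_to_natCast, pvHashValue_eq]; rfl)
  rw [pvRabinKarp]
  simp only [Int.ofNat_zero] at h0 ⊢
  rw [List.range_eq_range']
  simpa using h0

lemma pvWindow_iff (s t : List Char) (m ξ k : Nat) (hm : m = t.length) (hξ : ξ < m) (j : Char) :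
    pvW s m k = t.set ξ j ↔
      ((s.drop k)[ξ]? = some j ∧ (s.drop k).take ξ = t.take ξ ∧
        (s.drop (k + ξ + 1)).take (m - ξ - 1) = t.drop (ξ + 1)) := by
  rw [pvSet_char _ t ξ j (by omega)]
  have h1 : (pvW s m k).take ξ = (s.drop k).take ξ := by
    rw [pvW, List.take_take, min_eq_left (by omega)]
  have h2 : (pvW s m k)[ξ]? = (s.drop k)[ξ]? := List.getElem?_take_of_lt hξ
  have h3 : (pvW s m k).drop (ξ + 1) = (s.drop (k + ξ + 1)).take (m - ξ - 1) := by
    rw [pvW, List.drop_take, List.drop_drop,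
      show k + (ξ + 1) = k + ξ + 1 from by omega, show m - (ξ + 1) = m - ξ - 1 from by omega]
  rw [h1, h2, h3]
  tauto

lemma pvCount_eq (s t : List Char) (ξ : Nat) (hξ : ξ < t.length) (c1 c2 c3 : Char)
    (h12 : c1 ≠ c2) (h13 : c1 ≠ c3) (h23 : c2 ≠ c3) (N : Nat)
    (hN : ∀ k, k < N → k + t.length ≤ s.length) :
    ((List.range N).countP (fun k => decide (pvW s t.length k = t.set ξ c1)) +
     (List.range N).countP (fun k => decide (pvW s t.length k = t.set ξ c2)) +
     (List.range N).countP (fun k => decide (pvW s t.length k = t.set ξ c3)) : Nat)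
    = (List.range N).countP (fun (k : Nat) => decide (
        PySem.List.pyGetD s ((k : Int) + (ξ : Int)) 'A' ∈ [c1, c2, c3]
        ∧ PySem.List.slice s (some (k : Int)) (some ((k : Int) + (ξ : Int))) = PySem.List.slice t none (some (ξ : Int))
        ∧ PySem.List.slice s (some ((k : Int) + (ξ : Int) + 1)) (some ((k : Int) + (t.length : Int))) = PySem.List.slice t (some ((ξ : Int) + 1)) none)) := by
  have hdisj : ∀ (a b : Char), a ≠ b → ∀ k : Nat,
      ¬(pvW s t.length k = t.set ξ a ∧ pvW s t.length k = t.set ξ b) := by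
    rintro a b hab k ⟨h1, h2⟩
    rw [h1] at h2
    have h3 := congrArg (fun l => l[ξ]?) h2
    simp only [List.getElem?_set_self (by simpa using hξ)] at h3
    exact hab (by simpa using h3)
  rw [Nat.add_assoc,
    pvCountP_add_disjoint _ _ _ (fun k _ => by
      simpa using hdisj c2 c3 h23 k),
    pvCountP_add_disjoint _ _ _ (fun k _ => by
      simp only [decide_eq_true_eq, Bool.or_eq_true]
      rintro ⟨ha, hb | hb⟩
      · exact hdisj c1 c2 h12 k ⟨ha, hb⟩
      · exact hdisj c1 c3 h13 k ⟨ha, hb⟩)]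
  apply List.countP_congr
  intro k hk
  have hkN : k < N := by simpa using hk
  have hkm : k + t.length ≤ s.length := hN k hkN
  have hkξ : k + ξ < s.length := by omega
  have hgetk : PySem.List.pyGetD s ((k : Int) + (ξ : Int)) 'A' = s[k + ξ]'hkξ := by
    rw [PySem.List.pyGetD_eq_getElem s 'A' (by omega) (by omega)]
    have hix : ((k : Int) + (ξ : Int)).toNat = k + ξ := by omega
    simp [hix]
  have hdropk : (s.drop k)[ξ]? = some (s[k + ξ]'hkξ) := by
    rw [List.getElem?_drop, List.getElem?_eq_getElem (by omega)]
  have hsl1 : PySem.List.slice s (some (k : Int)) (some ((k : Int) + (ξ : Int))) = (s.drop k).take ξ :=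
    PySem.List.slice_natCast_add s k ξ
  have hsl2 : PySem.List.slice s (some ((k : Int) + (ξ : Int) + 1)) (some ((k : Int) + (t.length : Int)))
      = (s.drop (k + ξ + 1)).take (t.length - ξ - 1) := by
    rw [show (k : Int) + (ξ : Int) + 1 = ((k + ξ + 1 : Nat) : Int) from by push_cast; ring,
      show (k : Int) + (t.length : Int) = ((k + t.length : Nat) : Int) from by push_cast; ring,
      PySem.List.slice_natCast]
    congr 1
    omega
  have hslt1 : PySem.List.slice t none (some (ξ : Int)) = t.take ξ := PySem.List.slice_to_natCast t ξ
  have hslt2 : PySem.List.slice t (some ((ξ : Int) + 1)) none = t.drop (ξ + 1) := by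
    rw [show (ξ : Int) + 1 = ((ξ + 1 : Nat) : Int) from by push_cast; ring,
      PySem.List.slice_from_natCast]
  simp only [pvWindow_iff s t t.length ξ k rfl hξ, hdropk, hgetk, hsl1, hsl2, hslt1, hslt2,
    Bool.or_eq_true, decide_eq_true_eq, List.mem_cons, List.not_mem_nil, or_false,
    Option.some.injEq]
  tauto

theorem pvMain_eq (S : String) (sub : String) (x : Int) (L2 : List Int)
    (hpre : Pre_x_mutation_counter S sub x L2) :
    x_mutation_counter S sub x L2 = x_mutation_counter_alt S sub x L2 := by
  obtain ⟨⟨hge, hlt⟩, hmem⟩ := hpre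
  set s := S.toList with hsdef
  set t := sub.toList with htdef
  obtain ⟨ξ, hξm, hξval⟩ : ∃ ξ : Nat, ξ < t.length ∧
      (if x < 0 then x + (t.length : Int) else x) = (ξ : Int) := by
    refine ⟨(if x < 0 then x + (t.length : Int) else x).toNat, ?_, ?_⟩ <;> split_ifs <;> omega
  have hidx : PySem.List.pyIdx? t.length x = some ξ := by
    rw [PySem.List.pyIdx?]
    split_ifs at hξval ⊢ with h1 h2 h3 <;>
      (simp only [Option.some.injEq]; omega)
  have hget : PySem.List.pyGet? t x = some (t[ξ]'hξm) := by
    rw [PySem.List.pyGet?, hidx, Option.bind_some, List.getElem?_eq_getElem hξm]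
  have horig : PySem.List.pyGetD t x 'X' = t[ξ]'hξm := by
    rw [PySem.List.pyGetD, hget]; rfl
  rw [horig] at hmem
  have hset : ∀ j : Char, PySem.List.pySetD t x j = t.set ξ j := by
    intro j
    rw [PySem.List.pySetD, PySem.List.pySet?, hidx]; rfl
  -- unfold both ports down to the appended counts
  rw [x_mutation_counter, x_mutation_counter_alt]
  simp only [PySem.Str.pyGet?, PySem.Chars.pyGet?, ← htdef, ← hsdef, hget,
    PySem.List.remove?_eq_some_erase _ _ hmem, hξval]
  -- the number of windows the loops run over
  have hN : ∀ k, k < (((s.length : Int) - (t.length : Int) + 1).toNat) → k + t.length ≤ s.length := by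
    intro k hk; omega
  -- B's loop is a count
  rw [PySem.List.foldl_ite_add_one
        (fun i => PySem.List.pyGetD s (i + (ξ : Int)) 'A' ∈ ['A','C','G','T'].filter (fun c => c ≠ t[ξ]'hξm)
          ∧ PySem.List.slice s (some i) (some (i + (ξ : Int))) = PySem.List.slice t none (some (ξ : Int))
          ∧ PySem.List.slice s (some (i + (ξ : Int) + 1)) (some (i + (t.length : Int))) = PySem.List.slice t (some ((ξ : Int) + 1)) none),
      PySem.List.pyRange_one, List.countP_map]
  -- A's loop per case of the removed base
  simp only [List.mem_cons, List.not_mem_nil, or_false] at hmem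
  rcases hmem with h | h | h | h
  · rw [h]
    have herase : (['A','C','G','T'] : List Char).erase 'A' = ['C','G','T'] := by decide
    have halts : (['A','C','G','T'] : List Char).filter (fun c => c ≠ 'A') = ['C','G','T'] := by decide
    rw [herase, halts]
    have hrk : ∀ j : Char, (pvRabinKarp s (t.set ξ j)).length
        = (List.range (((s.length : Int) - (t.length : Int) + 1).toNat)).countP
            (fun k => decide (pvW s t.length k = t.set ξ j)) := by
      intro j
      have h9 := pvRabinKarp_length s (t.set ξ j) (by simp only [List.length_set]; omega)
      simpa only [List.length_set] using h9
    simp only [List.foldl_cons, List.foldl_nil, hset, hrk,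
      Function.comp_def, zero_add, sub_zero]
    rw [← pvCount_eq s t ξ hξm 'C' 'G' 'T' (by decide) (by decide) (by decide) _ hN]
    push_cast
    ring_nf
  · rw [h]
    have herase : (['A','C','G','T'] : List Char).erase 'C' = ['A','G','T'] := by decide
    have halts : (['A','C','G','T'] : List Char).filter (fun c => c ≠ 'C') = ['A','G','T'] := by decide
    rw [herase, halts]
    have hrk : ∀ j : Char, (pvRabinKarp s (t.set ξ j)).length
        = (List.range (((s.length : Int) - (t.length : Int) + 1).toNat)).countP
            (fun k => decide (pvW s t.length k = t.set ξ j)) := by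
      intro j
      have h9 := pvRabinKarp_length s (t.set ξ j) (by simp only [List.length_set]; omega)
      simpa only [List.length_set] using h9
    simp only [List.foldl_cons, List.foldl_nil, hset, hrk,
      Function.comp_def, zero_add, sub_zero]
    rw [← pvCount_eq s t ξ hξm 'A' 'G' 'T' (by decide) (by decide) (by decide) _ hN]
    push_cast
    ring_nf
  · rw [h]
    have herase : (['A','C','G','T'] : List Char).erase 'G' = ['A','C','T'] := by decide
    have halts : (['A','C','G','T'] : List Char).filter (fun c => c ≠ 'G') = ['A','C','T'] := by decide
    rw [herase, halts]
    have hrk : ∀ j : Char, (pvRabinKarp s (t.set ξ j)).length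
        = (List.range (((s.length : Int) - (t.length : Int) + 1).toNat)).countP
            (fun k => decide (pvW s t.length k = t.set ξ j)) := by
      intro j
      have h9 := pvRabinKarp_length s (t.set ξ j) (by simp only [List.length_set]; omega)
      simpa only [List.length_set] using h9
    simp only [List.foldl_cons, List.foldl_nil, hset, hrk,
      Function.comp_def, zero_add, sub_zero]
    rw [← pvCount_eq s t ξ hξm 'A' 'C' 'T' (by decide) (by decide) (by decide) _ hN]
    push_cast
    ring_nf
  · rw [h]
    have herase : (['A','C','G','T'] : List Char).erase 'T' = ['A','C','G'] := by decide
    have halts : (['A','C','G','T'] : List Char).filter (fun c => c ≠ 'T') = ['A','C','G'] := by decide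
    rw [herase, halts]
    have hrk : ∀ j : Char, (pvRabinKarp s (t.set ξ j)).length
        = (List.range (((s.length : Int) - (t.length : Int) + 1).toNat)).countP
            (fun k => decide (pvW s t.length k = t.set ξ j)) := by
      intro j
      have h9 := pvRabinKarp_length s (t.set ξ j) (by simp only [List.length_set]; omega)
      simpa only [List.length_set] using h9
    simp only [List.foldl_cons, List.foldl_nil, hset, hrk,
      Function.comp_def, zero_add, sub_zero]
    rw [← pvCount_eq s t ξ hξm 'A' 'C' 'G' (by decide) (by decide) (by decide) _ hN]
    push_cast
    ring_nf

-- ===== VERDICT (by name: the statement is the Claim_ definition above) =====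
theorem x_mutation_counter_spec : Claim_equal_x_mutation_counter := by
  intro S sub x L2 _ hpre
  exact pvMain_eq S sub x L2 hpre
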